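-- pv_equiv track=rewrite | github.com/bannik-git/python_lesson | Homework/Seminar_3/005_negative_fibonacci.py | negative_fibonacci
-- ===== SOURCE A (Python) =====
-- def negative_fibonacci(sequence_size: int) -> list:
--
--     positive_sequence = [1, 1]
--     for i in range(2, sequence_size):
--         positive_sequence.append(positive_sequence[i-1] + positive_sequence[i-2])
--
--     negative_sequence = positive_sequence.copy()
--     for i in range(1, len(negative_sequence), 2):
--         negative_sequence[i] *= -1
--     negative_sequence.reverse()
--
--     return negative_sequence + [0] + positive_sequence
-- ===== SOURCE B (Python) =====
-- def _fib_pair(k):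
--     # fast doubling: returns the pair of standard Fibonacci numbers at k and k plus one
--     if k == 0:
--         return (0, 1)
--     a, b = _fib_pair(k // 2)
--     c = a * (2 * b - a)
--     d = a * a + b * b
--     if k % 2:
--         return (d, c + d)
--     return (c, d)
--
--
-- def negative_fibonacci(sequence_size: int) -> list:
--     # Fast doubling gives the top Fibonacci pair; the whole symmetric signed
--     # sequence is then produced by ONE backward Fibonacci recurrence (each
--     # cell is the difference of the two to its right), filling right-to-left.
--     n = max(sequence_size, 2)
--     f, g = _fib_pair(n)
--     out = [0] * (2 * n + 1)
--     a, b = g, f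
--     for i in range(2 * n, -1, -1):
--         out[i] = b
--         a, b = b, a - b
--     return out
-- ===== Notes on version B (the rewrite author's own statement) =====
-- stated objective: alternative
-- what changed: B computes the top Fibonacci pair by fast-doubling recursion and then fills a preallocated list right-to-left with the single backward recurrence (each cell is the difference of the two cells to its right), producing the whole signed sequence directly; A builds the positive half by forward indexing, copies it, negates the odd positions in a stride-two pass and reverses.
import Mathlib
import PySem

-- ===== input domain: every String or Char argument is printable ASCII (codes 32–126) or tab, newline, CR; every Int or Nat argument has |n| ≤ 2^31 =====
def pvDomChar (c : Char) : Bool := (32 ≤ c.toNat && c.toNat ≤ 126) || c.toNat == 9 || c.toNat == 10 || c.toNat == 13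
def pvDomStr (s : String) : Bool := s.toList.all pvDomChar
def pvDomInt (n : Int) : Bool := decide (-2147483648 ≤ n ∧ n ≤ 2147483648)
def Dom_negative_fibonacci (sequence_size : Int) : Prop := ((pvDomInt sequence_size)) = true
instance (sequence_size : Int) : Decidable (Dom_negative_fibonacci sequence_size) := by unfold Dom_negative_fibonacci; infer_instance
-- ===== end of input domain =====

-- B replaces A's forward build + copy + negate-odd-indices + reverse by a fast-doubling
-- Fibonacci pair followed by one backward-recurrence fill of the whole output list.

-- ===== PORT A =====
def negative_fibonacci (sequence_size : Int) : List Int :=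
  let positive_sequence :=
    (PySem.List.pyRange 2 sequence_size 1).foldl
      (fun pos i =>
        pos ++ [PySem.List.pyGetD pos (i - 1) 0 + PySem.List.pyGetD pos (i - 2) 0])
      [1, 1]
  let negative_sequence :=
    (PySem.List.pyRange 1 (positive_sequence.length : Int) 2).foldl
      (fun neg i => PySem.List.pySetD neg i (PySem.List.pyGetD neg i 0 * (-1)))
      positive_sequence
  negative_sequence.reverse ++ [0] ++ positive_sequence

-- ===== PORT B =====
-- _fib_pair ported on Nat: B only ever calls it with k = max(sequence_size, 2) ≥ 2, where
-- Python's k // 2 and k % 2 coincide with Nat division/mod, so this is exact there.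
def pvFibPair (k : Nat) : Int × Int :=
  if h : k = 0 then (0, 1)
  else
    let p := pvFibPair (k / 2)
    let a := p.1
    let b := p.2
    let c := a * (2 * b - a)
    let d := a * a + b * b
    if k % 2 = 1 then (d, c + d) else (c, d)
termination_by k
decreasing_by exact Nat.div_lt_self (Nat.pos_of_ne_zero h) (by norm_num)

def negative_fibonacci_alt (sequence_size : Int) : List Int :=
  let n := max sequence_size 2
  let p := pvFibPair n.toNat
  let f := p.1
  let g := p.2
  let st :=
    (PySem.List.pyRange (2 * n) (-1) (-1)).foldl
      (fun (st : List Int × Int × Int) i =>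
        match st with
        | (out, a, b) => (PySem.List.pySetD out i b, b, a - b))
      (List.replicate (2 * n + 1).toNat 0, g, f)
  st.1

-- ===== PRECONDITION & SPEC =====
def Spec_negative_fibonacci (sequence_size : Int) (out : List Int) : Prop := out = negative_fibonacci_alt sequence_size
instance (sequence_size : Int) (out : List Int) : Decidable (Spec_negative_fibonacci sequence_size out) := by unfold Spec_negative_fibonacci; infer_instance

-- ===== CLAIM (what is proved, stated in full; the proofs are below) =====
def Claim_equal_negative_fibonacci : Prop := ∀ (sequence_size : Int), Dom_negative_fibonacci sequence_size → Spec_negative_fibonacci sequence_size (negative_fibonacci sequence_size)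

-- ===== LEMMAS AND PROOFS =====

-- Fibonacci with seed (1, 1): positive_sequence's values
def pvFib : Nat → Int
  | 0 => 1
  | 1 => 1
  | n + 2 => pvFib n + pvFib (n + 1)

def pvFibL (m : Nat) : List Int := (List.range m).map pvFib

def pvSgL (m : Nat) : List Int := (List.range m).map (fun j => (-1) ^ j * pvFib j)

theorem pvFibL_len (m : Nat) : (pvFibL m).length = m := by simp [pvFibL]

theorem pvSgL_len (m : Nat) : (pvSgL m).length = m := by simp [pvSgL]

theorem pvFib_eq (j : Nat) : pvFib j = (Nat.fib (j + 1) : Int) := by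
  induction j using pvFib.induct with
  | case1 => decide
  | case2 => decide
  | case3 n ih1 ih2 =>
      rw [pvFib, ih1, ih2]
      norm_cast
      exact (Nat.fib_add_two (n := n + 1)).symm

-- ===== A-side characterisation =====
theorem pos_fold_eq (k : Nat) :
    (PySem.List.pyRange 2 (2 + (k : Int)) 1).foldl
      (fun pos i =>
        pos ++ [PySem.List.pyGetD pos (i - 1) 0 + PySem.List.pyGetD pos (i - 2) 0])
      [1, 1] = pvFibL (2 + k) := by
  induction k with
  | zero =>
      simp [PySem.List.pyRange_one_eq_nil, pvFibL, List.range_succ]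
      decide
  | succ k ih =>
      have h : (2 + ((k + 1 : Nat) : Int)) = (2 + (k : Int)) + 1 := by omega
      rw [h, PySem.List.pyRange_one_succ_right (by omega), List.foldl_append, ih]
      simp only [List.foldl_cons, List.foldl_nil]
      have h1 : (2 + (k : Int)) - 1 = ((k + 1 : Nat) : Int) := by omega
      have h2 : (2 + (k : Int)) - 2 = ((k : Nat) : Int) := by omega
      rw [h1, h2, PySem.List.pyGetD_natCast, PySem.List.pyGetD_natCast]
      unfold pvFibL
      rw [PySem.List.getD_map_range _ _ _ _ (by omega),
          PySem.List.getD_map_range _ _ _ _ (by omega)]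
      rw [show 2 + (k + 1) = (2 + k) + 1 from by omega, List.range_succ]
      simp [pvFib, Nat.add_comm, Int.add_comm]

theorem pyRange2_count (m : Nat) :
    PySem.List.pyRange 1 (m : Int) 2 =
      (List.range (m / 2)).map (fun k : Nat => 1 + 2 * (k : Int)) := by
  rw [PySem.List.pyRange_of_pos _ _ (by norm_num)]
  have hcnt : (if (1 : Int) < (m : Int) then (((m : Int) - 1 + 2 - 1) / 2).toNat else 0) = m / 2 := by
    split_ifs with h <;> omega
  rw [hcnt]

theorem pyRange2_even (m : Nat) (hm : m % 2 = 0) :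
    PySem.List.pyRange 1 ((m : Int) + 1) 2 = PySem.List.pyRange 1 (m : Int) 2 := by
  have h : ((m : Int) + 1) = ((m + 1 : Nat) : Int) := by omega
  rw [h, pyRange2_count, pyRange2_count]
  have : (m + 1) / 2 = m / 2 := by omega
  rw [this]

theorem pyRange2_odd (m : Nat) (hm : m % 2 = 1) :
    PySem.List.pyRange 1 ((m : Int) + 1) 2 =
      PySem.List.pyRange 1 (m : Int) 2 ++ [(m : Int)] := by
  have h : ((m : Int) + 1) = ((m + 1 : Nat) : Int) := by omega
  rw [h, pyRange2_count, pyRange2_count]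
  have hc : (m + 1) / 2 = m / 2 + 1 := by omega
  rw [hc, List.range_succ]
  simp
  omega

theorem neg_fold_append (r : List Int) :
    ∀ (xs : List Int) (v : Int), (∀ i ∈ r, 0 ≤ i ∧ i < (xs.length : Int)) →
    r.foldl (fun neg i => PySem.List.pySetD neg i (PySem.List.pyGetD neg i 0 * (-1))) (xs ++ [v])
      = r.foldl (fun neg i => PySem.List.pySetD neg i (PySem.List.pyGetD neg i 0 * (-1))) xs ++ [v] := by
  induction r with
  | nil => intro xs v _; simp
  | cons i r ih =>
      intro xs v hb
      obtain ⟨h0, h1⟩ := hb i (List.mem_cons_self)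
      have hi : i = ((i.toNat : Nat) : Int) := by omega
      have hlt : i.toNat < xs.length := by omega
      simp only [List.foldl_cons]
      have hget : PySem.List.pyGetD (xs ++ [v]) i 0 = PySem.List.pyGetD xs i 0 := by
        rw [hi, PySem.List.pyGetD_natCast, PySem.List.pyGetD_natCast]
        rw [List.getD_eq_getElem?_getD, List.getD_eq_getElem?_getD,
            List.getElem?_append_left hlt]
      have hset : ∀ w, PySem.List.pySetD (xs ++ [v]) i w = PySem.List.pySetD xs i w ++ [v] := by
        intro w
        rw [hi, PySem.List.pySetD_natCast, PySem.List.pySetD_natCast,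
            List.set_append_left _ _ hlt]
      rw [hget, hset]
      apply ih
      intro j hj
      obtain ⟨g0, g1⟩ := hb j (List.mem_cons_of_mem _ hj)
      refine ⟨g0, ?_⟩
      rw [PySem.List.length_pySetD]
      exact g1

theorem neg_fold_eq (m : Nat) :
    (PySem.List.pyRange 1 (m : Int) 2).foldl
      (fun neg i => PySem.List.pySetD neg i (PySem.List.pyGetD neg i 0 * (-1)))
      (pvFibL m) = pvSgL m := by
  induction m with
  | zero => simp [pvFibL, pvSgL]; decide
  | succ m ih =>
      have hb : ∀ i ∈ PySem.List.pyRange 1 (m : Int) 2, 0 ≤ i ∧ i < ((pvFibL m).length : Int) := by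
        intro i hi
        rw [PySem.List.mem_pyRange_iff_of_pos (by norm_num)] at hi
        rw [pvFibL_len]
        exact ⟨by omega, hi.2.1⟩
      have hfibL : pvFibL (m + 1) = pvFibL m ++ [pvFib m] := by
        simp [pvFibL, List.range_succ]
      have hcast : ((m + 1 : Nat) : Int) = (m : Int) + 1 := by omega
      rcases Nat.even_or_odd m with he | ho
      · have hm : m % 2 = 0 := Nat.even_iff.mp he
        rw [hcast, pyRange2_even m hm, hfibL, neg_fold_append _ _ _ hb, ih]
        simp [pvSgL, List.range_succ, he.neg_one_pow]
      · have hm : m % 2 = 1 := Nat.odd_iff.mp ho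
        rw [hcast, pyRange2_odd m hm, hfibL, List.foldl_append, neg_fold_append _ _ _ hb, ih]
        simp only [List.foldl_cons, List.foldl_nil]
        have hget : PySem.List.pyGetD (pvSgL m ++ [pvFib m]) (m : Int) 0 = pvFib m := by
          rw [PySem.List.pyGetD_natCast, List.getD_eq_getElem?_getD,
              List.getElem?_append_right (by rw [pvSgL_len])]
          simp [pvSgL_len]
        have hset : PySem.List.pySetD (pvSgL m ++ [pvFib m]) (m : Int) (pvFib m * (-1))
            = pvSgL m ++ [pvFib m * (-1)] := by
          rw [PySem.List.pySetD_natCast, List.set_append_right _ _ (by rw [pvSgL_len])]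
          simp [pvSgL_len]
        rw [hget, hset]
        simp [pvSgL, List.range_succ, ho.neg_one_pow]

theorem pos_eq (s : Int) :
    (PySem.List.pyRange 2 s 1).foldl
      (fun pos i =>
        pos ++ [PySem.List.pyGetD pos (i - 1) 0 + PySem.List.pyGetD pos (i - 2) 0])
      [1, 1] = pvFibL (max s 2).toNat := by
  rcases le_or_gt s 2 with h | h
  · rw [PySem.List.pyRange_one_eq_nil h]
    have : (max s 2).toNat = 2 := by omega
    rw [this]
    simp [pvFibL, List.range_succ]
    decide
  · have hk : s = 2 + (((s - 2).toNat : Nat) : Int) := by omega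
    have hm : (max s 2).toNat = 2 + (s - 2).toNat := by omega
    rw [hm, ← pos_fold_eq, ← hk]

-- ===== B-side: fast doubling is Fibonacci =====
theorem pvFibPair_eq (k : Nat) : pvFibPair k = ((Nat.fib k : Int), (Nat.fib (k + 1) : Int)) := by
  induction k using Nat.strong_induction_on with
  | _ k ih =>
      rw [pvFibPair]
      by_cases h : k = 0
      · simp [h]
      · rw [dif_neg h]
        simp only [ih (k / 2) (Nat.div_lt_self (Nat.pos_of_ne_zero h) (by norm_num))]
        have hle : Nat.fib (k / 2) ≤ 2 * Nat.fib (k / 2 + 1) :=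
          le_trans Nat.fib_le_fib_succ (by omega)
        have h2m : ((Nat.fib (2 * (k / 2)) : Int))
            = (Nat.fib (k / 2) : Int) * (2 * (Nat.fib (k / 2 + 1) : Int) - (Nat.fib (k / 2) : Int)) := by
          rw [Nat.fib_two_mul]
          push_cast [Nat.cast_sub hle]
          ring
        have h2m1 : ((Nat.fib (2 * (k / 2) + 1) : Int))
            = (Nat.fib (k / 2) : Int) * (Nat.fib (k / 2) : Int)
              + (Nat.fib (k / 2 + 1) : Int) * (Nat.fib (k / 2 + 1) : Int) := by
          rw [Nat.fib_two_mul_add_one]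
          push_cast
          ring
        rcases Nat.even_or_odd k with he | ho
        · have hm : k % 2 = 0 := Nat.even_iff.mp he
          simp only [hm]
          norm_num
          constructor
          · conv_rhs => rw [show k = 2 * (k / 2) from by omega]
            rw [h2m]
          · conv_rhs => rw [show k + 1 = 2 * (k / 2) + 1 from by omega]
            rw [h2m1]
        · have hm : k % 2 = 1 := Nat.odd_iff.mp ho
          simp only [hm]
          norm_num
          constructor
          · conv_rhs => rw [show k = 2 * (k / 2) + 1 from by omega]
            rw [h2m1]
          · conv_rhs => rw [show k + 1 = (2 * (k / 2)) + 2 from by omega]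
            rw [Nat.fib_add_two]
            push_cast
            rw [h2m, h2m1]

-- Fibonacci extended to all integer indices: negative indices carry alternating signs
def pvZF (k : Int) : Int :=
  if 0 ≤ k then (Nat.fib k.toNat : Int) else (-1) ^ ((-k).toNat + 1) * (Nat.fib (-k).toNat : Int)

theorem pvZF_sub (k : Int) : pvZF (k + 1) - pvZF k = pvZF (k - 1) := by
  rcases le_or_gt 1 k with h1 | h1
  · -- all three indices nonnegative
    have e1 : (k + 1).toNat = (k - 1).toNat + 2 := by omega
    have e2 : k.toNat = (k - 1).toNat + 1 := by omega
    simp only [pvZF, if_pos (by omega : (0:Int) ≤ k + 1), if_pos (by omega : (0:Int) ≤ k),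
      if_pos (by omega : (0:Int) ≤ k - 1), e1, e2, Nat.fib_add_two]
    push_cast
    ring
  · rcases le_or_gt 0 k with h0 | h0
    · -- k = 0
      have hk : k = 0 := by omega
      subst hk
      decide
    · rcases eq_or_lt_of_le (by omega : k ≤ -1) with hk | hk
      · subst hk
        decide
      · -- k ≤ -2: all three negative sides
        have hm : 1 ≤ (-(k + 1)).toNat := by omega
        have e0 : (-(k - 1)).toNat = (-(k + 1)).toNat + 2 := by omega
        have e1 : (-k).toNat = (-(k + 1)).toNat + 1 := by omega
        simp only [pvZF, if_neg (by omega : ¬ (0:Int) ≤ k + 1), if_neg (by omega : ¬ (0:Int) ≤ k),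
          if_neg (by omega : ¬ (0:Int) ≤ k - 1), e0, e1]
        rw [show (-(k+1)).toNat + 1 + 1 = (-(k+1)).toNat + 2 from rfl,
            show (-(k+1)).toNat + 2 + 1 = (-(k+1)).toNat + 1 + 2 from rfl]
        rw [Nat.fib_add_two (n := (-(k+1)).toNat)]
        push_cast
        rw [pow_add, pow_add]
        ring

-- the pure value of B's backward fill
def pvFillList : Nat → Int × Int → List Int
  | 0, _ => []
  | m + 1, (a, b) => pvFillList m (b, a - b) ++ [b]

theorem fill_fold (j : Nat) :
    ∀ (suffix : List Int) (a b : Int),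
    ((PySem.List.pyRange ((j : Int) - 1) (-1) (-1)).foldl
       (fun (st : List Int × Int × Int) i =>
         match st with
         | (out, a, b) => (PySem.List.pySetD out i b, b, a - b))
       (List.replicate j 0 ++ suffix, a, b)).1
    = pvFillList j (a, b) ++ suffix := by
  induction j with
  | zero =>
      intro suffix a b
      rw [PySem.List.pyRange_neg_one_eq_nil (by norm_num)]
      simp [pvFillList]
  | succ j ih =>
      intro suffix a b
      have hc : ((j + 1 : Nat) : Int) - 1 = (j : Int) := by omega
      rw [hc, PySem.List.pyRange_neg_one_cons (by omega)]
      simp only [List.foldl_cons]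
      have hrep : List.replicate (j + 1) (0 : Int) = List.replicate j 0 ++ [0] := by
        rw [List.replicate_succ']
      have hset : PySem.List.pySetD (List.replicate (j + 1) (0 : Int) ++ suffix) (j : Int) b
          = List.replicate j 0 ++ (b :: suffix) := by
        rw [PySem.List.pySetD_natCast, hrep, List.append_assoc,
            List.set_append_right _ _ (by simp)]
        simp
      rw [hset, ih (b :: suffix) b (a - b)]
      simp [pvFillList]

theorem fill_zf (m : Nat) :
    ∀ (k : Int), pvFillList m (pvZF (k + 1), pvZF k)
      = (List.range m).map (fun t : Nat => pvZF (k - (m : Int) + 1 + (t : Int))) := by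
  induction m with
  | zero => intro k; simp [pvFillList]
  | succ m ih =>
      intro k
      show pvFillList m (pvZF k, pvZF (k + 1) - pvZF k) ++ [pvZF k] = _
      rw [pvZF_sub, show pvZF k = pvZF ((k - 1) + 1) from by norm_num, ih (k - 1)]
      rw [List.range_succ, List.map_append]
      congr 1
      · apply List.map_congr_left
        intro t _
        congr 1
        push_cast
        ring
      · simp only [List.map_cons, List.map_nil]
        congr 1
        push_cast
        ring_nf

theorem sgL_reverse (n : Nat) :
    (List.range n).map (fun t : Nat => pvZF ((t : Int) - (n : Int))) = (pvSgL n).reverse := by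
  apply List.ext_getElem
  · simp [pvSgL]
  · intro i h1 h2
    simp only [List.getElem_map, List.getElem_range]
    have hi : i < n := by simpa using h1
    rw [List.getElem_reverse]
    simp only [pvSgL, List.getElem_map, List.getElem_range, List.length_map, List.length_range]
    have hneg : ¬ (0 : Int) ≤ (i : Int) - n := by omega
    have htn : (-((i : Int) - n)).toNat = n - i := by omega
    rw [pvZF, if_neg hneg, htn, pvFib_eq]
    have hfe : n - 1 - i + 1 = n - i := by omega
    rw [hfe]
    have hpe : (-1 : Int) ^ (n - i + 1) = (-1) ^ (n - 1 - i) := by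
      rw [show n - i + 1 = (n - 1 - i) + 2 from by omega, pow_add]
      norm_num
    rw [hpe]

theorem fibL_pos (n : Nat) :
    (List.range n).map (fun j : Nat => pvZF ((n : Int) + 1 + (j : Int) - (n : Int))) = pvFibL n := by
  unfold pvFibL
  apply List.map_congr_left
  intro j _
  have he : (n : Int) + 1 + j - n = ((j + 1 : Nat) : Int) := by push_cast; ring
  rw [he, pvZF, if_pos (by positivity), pvFib_eq]
  simp

theorem assemble (n : Nat) :
    (List.range (2 * n + 1)).map (fun t : Nat => pvZF ((t : Int) - (n : Int)))
      = (pvSgL n).reverse ++ [0] ++ pvFibL n := by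
  have hsplit : 2 * n + 1 = (n + 1) + n := by omega
  rw [hsplit, List.range_add, List.range_succ, List.map_append, List.map_append]
  congr 1
  · congr 1
    · exact sgL_reverse n
    · simp [pvZF]
  · rw [List.map_map]
    rw [← fibL_pos n]
    apply List.map_congr_left
    intro j _
    simp only [Function.comp_apply]
    congr 1
  
theorem alt_eq (s : Int) :
    negative_fibonacci_alt s
      = (pvSgL (max s 2).toNat).reverse ++ [0] ++ pvFibL (max s 2).toNat := by
  unfold negative_fibonacci_alt
  simp only []
  set N : Nat := (max s 2).toNat with hN
  have hmax : max s 2 = (N : Int) := by omega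
  have hlen : (2 * max s 2 + 1).toNat = 2 * N + 1 := by omega
  have hstart : 2 * max s 2 = ((2 * N + 1 : Nat) : Int) - 1 := by omega
  rw [hmax, pvFibPair_eq]
  have hrep : List.replicate (2 * (N:Int) + 1).toNat (0:Int)
      = List.replicate (2 * N + 1) 0 ++ [] := by
    rw [List.append_nil]
    congr 1
  have hrange : (2 : Int) * (N : Int) = ((2 * N + 1 : Nat) : Int) - 1 := by omega
  rw [hrep, hrange, fill_fold (2 * N + 1) [] _ _, List.append_nil]
  have hzf1 : (Nat.fib (N + 1) : Int) = pvZF ((N : Int) + 1) := by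
    rw [pvZF, if_pos (by positivity)]
    congr 1
  have hzf0 : (Nat.fib N : Int) = pvZF (N : Int) := by
    rw [pvZF, if_pos (by positivity)]
    simp
  rw [hzf1, hzf0, fill_zf (2 * N + 1) (N : Int)]
  rw [← assemble N]
  apply List.map_congr_left
  intro t _
  congr 1
  push_cast
  ring

-- ===== VERDICT (by name: the statement is the Claim_ definition above) =====
theorem negative_fibonacci_spec : Claim_equal_negative_fibonacci := by
  intro s _
  unfold Spec_negative_fibonacci negative_fibonacci
  simp only []
  rw [pos_eq, pvFibL_len, neg_fold_eq, alt_eq]
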